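-- pv_equiv track=rewrite | github.com/C1ey/Secret-s-pi-codes | Secret_s_pi_codes.py | findSecrets1
-- ===== SOURCE A (Python) =====
-- def findSecrets1(arr, queries):
--     result=[]
--     n=len(arr)
--     for i, j in queries:
--         product=1
--         for index in range(i, j+1):
--             product *=arr[index]
--         result.append(product)
--     return result
-- ===== SOURCE B (Python) =====
-- def findSecrets1(arr, queries):
--     # Prefix zero-count answers any query whose range contains a zero in O(1);
--     # other queries multiply their range by balanced divide-and-conquer.
--     zeros = [0]
--     for x in arr:
--         zeros.append(zeros[-1] + (1 if x == 0 else 0))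
--
--     def prod_range(lo, hi):
--         if hi - lo == 1:
--             return arr[lo]
--         mid = (lo + hi) // 2
--         return prod_range(lo, mid) * prod_range(mid, hi)
--
--     result = []
--     for i, j in queries:
--         if i > j:
--             result.append(1)
--         elif zeros[j + 1] - zeros[i] > 0:
--             result.append(0)
--         else:
--             result.append(prod_range(i, j + 1))
--     return result
-- ===== Notes on version B (the rewrite author's own statement) =====
-- stated objective: alternative
-- what changed: Replaces A's per-query left-to-right index loop with a prefix zero-count (O(1) answer 0 for any range containing a zero) plus balanced divide-and-conquer multiplication for zero-free ranges.
-- outside the precondition, e.g. on findSecrets1([-1, 0], [(-2, -2)]): A returns [-1], B returns [0]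
import Mathlib
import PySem

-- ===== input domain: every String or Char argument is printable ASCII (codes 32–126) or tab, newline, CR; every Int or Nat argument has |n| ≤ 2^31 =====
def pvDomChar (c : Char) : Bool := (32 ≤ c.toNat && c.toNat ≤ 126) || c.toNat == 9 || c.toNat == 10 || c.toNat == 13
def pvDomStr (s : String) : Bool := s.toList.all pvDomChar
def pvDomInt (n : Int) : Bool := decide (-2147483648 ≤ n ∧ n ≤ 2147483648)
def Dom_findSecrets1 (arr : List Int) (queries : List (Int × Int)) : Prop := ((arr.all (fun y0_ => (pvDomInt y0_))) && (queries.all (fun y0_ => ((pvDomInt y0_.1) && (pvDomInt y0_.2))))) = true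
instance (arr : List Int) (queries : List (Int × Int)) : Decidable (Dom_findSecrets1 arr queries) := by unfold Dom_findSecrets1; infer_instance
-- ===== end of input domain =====

-- B answers zero-containing ranges in O(1) via a prefix zero-count and multiplies the
-- remaining ranges by balanced divide-and-conquer instead of A's left-to-right loop.

-- ===== PORT A =====
def findSecrets1 (arr : List Int) (queries : List (Int × Int)) : List Int :=
  queries.foldl (fun result ij =>
    result ++ [(PySem.List.pyRange ij.1 (ij.2 + 1) 1).foldl
      (fun product index => product * PySem.List.pyGetD arr index 0) 1]) []

-- ===== PORT B =====
def findSecrets1Zeros (arr : List Int) : List Int :=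
  arr.foldl (fun z x => z ++ [PySem.List.pyGetD z (-1) 0 + (if x = 0 then 1 else 0)]) [0]

def findSecrets1ProdRange (arr : List Int) (fuel : Nat) (lo hi : Int) : Int :=
  match fuel with
  | 0 => 1
  | Nat.succ fuel =>
    if hi - lo = 1 then PySem.List.pyGetD arr lo 0
    else
      findSecrets1ProdRange arr fuel lo (PySem.Int.floordiv (lo + hi) 2) *
      findSecrets1ProdRange arr fuel (PySem.Int.floordiv (lo + hi) 2) hi

-- B's prod_range closure; the fuel argument only makes the recursion total — under
-- Pre_ it is called with fuel = hi - lo > 0, which bounds the recursion depth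
def findSecrets1_alt (arr : List Int) (queries : List (Int × Int)) : List Int :=
  let zeros := findSecrets1Zeros arr
  queries.foldl (fun result ij =>
    result ++ [if ij.1 > ij.2 then (1 : Int)
      else if PySem.List.pyGetD zeros (ij.2 + 1) 0 - PySem.List.pyGetD zeros ij.1 0 > 0 then 0
      else findSecrets1ProdRange arr (ij.2 + 1 - ij.1).toNat ij.1 (ij.2 + 1)]) []

-- ===== PRECONDITION & SPEC =====
-- Pre_ admits every query whose index range is empty (j < i) or fully in bounds (0 ≤ i, j < n).
-- It excludes queries where A raises IndexError (an index past either end with i ≤ j) and queries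
-- with a negative i and i ≤ j, where A's value comes from Python's accidental negative-index
-- wraparound and B's from wrapped prefix-table lookups — neither value is specified.
def Pre_findSecrets1 (arr : List Int) (queries : List (Int × Int)) : Prop :=
  ∀ q ∈ queries, q.2 < q.1 ∨ (0 ≤ q.1 ∧ q.2 < (arr.length : Int))
instance (arr : List Int) (queries : List (Int × Int)) : Decidable (Pre_findSecrets1 arr queries) := by
  unfold Pre_findSecrets1; infer_instance

def pvWitness_findSecrets1 : List Int × (List (Int × Int)) :=
  ([2, 0, 3], [(0, 2), (1, 1), (2, 2), (2, 0)])

def Spec_findSecrets1 (arr : List Int) (queries : List (Int × Int)) (out : List Int) : Prop := out = findSecrets1_alt arr queries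
instance (arr : List Int) (queries : List (Int × Int)) (out : List Int) : Decidable (Spec_findSecrets1 arr queries out) := by unfold Spec_findSecrets1; infer_instance

-- ===== CLAIM (what is proved, stated in full; the proofs are below) =====
def Claim_equal_findSecrets1 : Prop := ∀ (arr : List Int) (queries : List (Int × Int)), Dom_findSecrets1 arr queries → Pre_findSecrets1 arr queries → Spec_findSecrets1 arr queries (findSecrets1 arr queries)

-- ===== LEMMAS AND PROOFS =====

-- closed form of B's prefix zero-count loop, and of prod_range as the segment product
theorem findSecrets1Zeros_eq (arr : List Int) :
    findSecrets1Zeros arr =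
      (List.range (arr.length + 1)).map (fun k => ((arr.take k).countP (fun x => x == 0) : Int)) := by
  induction arr using List.reverseRecOn with
  | nil => decide
  | append_singleton ys x ih =>
    unfold findSecrets1Zeros at *
    rw [List.foldl_append, ih]
    simp only [List.foldl_cons, List.foldl_nil]
    have h2 : PySem.List.pyGetD ((List.range (ys.length + 1)).map
        (fun k => ((ys.take k).countP (fun x => x == 0) : Int))) (-1) 0
        = (ys.countP (fun x => x == 0) : Int) := by
      rw [List.range_succ, List.map_append]
      simp only [List.map_cons, List.map_nil,
        PySem.List.pyGetD_neg_one_append_singleton, List.take_length]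
    rw [h2]
    have hlen : (ys ++ [x]).length + 1 = (ys.length + 1) + 1 := by simp
    have hl2 : ys.length + 1 = (ys ++ [x]).length := by simp
    conv_rhs => rw [hlen, List.range_succ, List.map_append]
    congr 1
    · exact List.map_congr_left (fun k hk => by
        rw [List.take_append_of_le_length (by simpa using Nat.lt_succ_iff.mp (List.mem_range.mp hk))])
    · clear ih
      simp only [List.map_cons, List.map_nil, List.cons.injEq, and_true]
      rw [hl2, List.take_length, List.countP_append]
      simp only [List.countP_cons, List.countP_nil]
      by_cases hx : x = 0 <;> simp [hx]

theorem findSecrets1ProdRange_eq (arr : List Int) (fuel : Nat) :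
    ∀ (lo hi : Nat), lo < hi → hi ≤ arr.length → hi - lo ≤ fuel →
    findSecrets1ProdRange arr fuel (lo : Int) (hi : Int) =
      ((arr.drop lo).take (hi - lo)).prod := by
  induction fuel with
  | zero => intro lo hi h1 h2 h3; omega
  | succ fuel ih =>
    intro lo hi h1 h2 h3
    simp only [findSecrets1ProdRange]
    by_cases he : (hi : Int) - (lo : Int) = 1
    · rw [if_pos he]
      have hlo : lo < arr.length := by omega
      have hhi : hi = lo + 1 := by omega
      rw [PySem.List.pyGetD_natCast, List.getD_eq_getElem arr 0 hlo, hhi]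
      rw [show lo + 1 - lo = 1 by omega, List.take_one, List.head?_drop,
          List.getElem?_eq_getElem hlo]
      simp
    · rw [if_neg he]
      have hge : lo + 2 ≤ hi := by omega
      set mid := PySem.Int.floordiv ((lo : Int) + hi) 2 with hmid
      have hdm := PySem.Int.floordiv_mul_add_mod ((lo : Int) + hi) 2
      have hr0 := PySem.Int.mod_nonneg ((lo : Int) + hi) (by norm_num : (0:Int) < 2)
      have hr1 := PySem.Int.mod_lt ((lo : Int) + hi) (by norm_num : (0:Int) < 2)
      have hm1 : (lo : Int) < mid ∧ mid < (hi : Int) := by omega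
      obtain ⟨m', hm'⟩ : ∃ m : Nat, mid = (m : Int) :=
        ⟨mid.toNat, (Int.toNat_of_nonneg (by omega)).symm⟩
      have hlm : lo < m' := by omega
      have hmh : m' < hi := by omega
      rw [hm', ih lo m' hlm (by omega) (by omega), ih m' hi hmh (by omega) (by omega)]
      rw [show hi - lo = (m' - lo) + (hi - m') by omega, List.take_add, List.drop_drop,
          show lo + (m' - lo) = m' by omega, List.prod_append]

-- the two per-query answers agree for every admitted query
theorem pvQuery_eq (arr : List Int) (i j : Int)
    (h : j < i ∨ (0 ≤ i ∧ j < (arr.length : Int))) :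
    (PySem.List.pyRange i (j + 1) 1).foldl
      (fun product index => product * PySem.List.pyGetD arr index 0) 1 =
    (if i > j then (1 : Int)
      else if PySem.List.pyGetD (findSecrets1Zeros arr) (j + 1) 0 -
              PySem.List.pyGetD (findSecrets1Zeros arr) i 0 > 0 then 0
      else findSecrets1ProdRange arr (j + 1 - i).toNat i (j + 1)) := by
  by_cases hij : i > j
  · rw [if_pos hij, PySem.List.pyRange_one_eq_nil (by omega), List.foldl_nil]
  · rw [if_neg hij]
    obtain ⟨hi0, hjn⟩ : 0 ≤ i ∧ j < (arr.length : Int) := by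
      rcases h with h | h
      · omega
      · exact h
    -- natural-number views of the indices
    obtain ⟨i', rfl⟩ : ∃ k : Nat, i = (k : Int) := ⟨i.toNat, (Int.toNat_of_nonneg hi0).symm⟩
    obtain ⟨j', rfl⟩ : ∃ k : Nat, j = (k : Int) := ⟨j.toNat, (Int.toNat_of_nonneg (by omega)).symm⟩
    have hij' : i' ≤ j' := by exact_mod_cast not_lt.mp hij
    have hjn' : j' < arr.length := by exact_mod_cast hjn
    rw [findSecrets1Zeros_eq]
    -- reduce the four prefix-table lookups
    have hlook : ∀ (g : Nat → Int) (k : Nat) (d : Int), k ≤ arr.length →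
        PySem.List.pyGetD ((List.range (arr.length + 1)).map g) (k : Int) d = g k := by
      intro g k d hk
      simp [List.getD_eq_getElem?_getD, Nat.lt_succ_of_le hk]
    have hcast : ((j' : Int) + 1) = ((j' + 1 : Nat) : Int) := by push_cast; ring
    rw [hcast, hlook _ _ _ (by omega), hlook _ _ _ (by omega)]
    set seg := (arr.drop i').take (j' + 1 - i') with hseg
    have htake : arr.take (j' + 1) = arr.take i' ++ seg := by
      rw [show j' + 1 = i' + (j' + 1 - i') by omega, List.take_add]
    -- A's loop over the index range is the product of the segment
    have hA : (PySem.List.pyRange (i' : Int) ((j' + 1 : Nat) : Int) 1).foldl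
        (fun product index => product * PySem.List.pyGetD arr index 0) 1 = seg.prod := by
      have hlen : ((j' + 1 : Nat) : Int) = ((arr.take (j' + 1)).length : Int) := by
        simp [List.length_take]; omega
      have hsw : (PySem.List.pyRange (i' : Int) ((j' + 1 : Nat) : Int) 1).foldl
          (fun product index => product * PySem.List.pyGetD arr index 0) 1 =
          (PySem.List.pyRange (i' : Int) ((j' + 1 : Nat) : Int) 1).foldl
          (fun product index => product * PySem.List.pyGetD (arr.take (j' + 1)) index 0) 1 := by
        apply PySem.List.foldl_congr_mem
        intro acc idx hidx
        have hmem := (PySem.List.mem_pyRange_one).mp hidx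
        have h0 : 0 ≤ idx := by omega
        rw [PySem.List.pyGetD_eq_getElem arr 0 h0 (by push_cast at hmem ⊢; omega),
            PySem.List.pyGetD_eq_getElem (arr.take (j' + 1)) 0 h0
              (by simp [List.length_take]; push_cast at hmem ⊢; omega)]
        rw [List.getElem_take]
      rw [hsw, hlen, PySem.List.foldl_pyRange_pyGetD' (arr.take (j' + 1)) 0
            (fun product v => product * v) 1 (by omega)]
      rw [Int.toNat_natCast, htake,
          List.drop_left' (by simp [List.length_take]; omega), List.prod_eq_foldl]
    rw [hA]
    have hZ : (arr.take (j' + 1)).countP (fun x => x == 0) =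
        (arr.take i').countP (fun x => x == 0) + seg.countP (fun x => x == 0) := by
      rw [htake, List.countP_append]
    by_cases hzero : 0 < seg.countP (fun x => x == 0)
    · rw [if_pos (by rw [hZ]; push_cast; omega)]
      obtain ⟨x, hxmem, hx⟩ := List.countP_pos_iff.mp hzero
      have : x = 0 := by simpa using hx
      exact List.prod_eq_zero (this ▸ hxmem)
    · have hz0 : seg.countP (fun x => x == 0) = 0 := Nat.eq_zero_of_not_pos hzero
      rw [if_neg (by rw [hZ, hz0]; push_cast; omega)]
      rw [show ((j' + 1 : Nat) : Int) - (i' : Int) = ((j' + 1 - i' : Nat) : Int) by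
            push_cast; omega, Int.toNat_natCast]
      exact (findSecrets1ProdRange_eq arr (j' + 1 - i') i' (j' + 1)
        (by omega) (by omega) (by omega)).symm

-- ===== VERDICT (by name: the statement is the Claim_ definition above) =====
theorem findSecrets1_spec : Claim_equal_findSecrets1 := by
  intro arr queries _ hpre
  unfold Spec_findSecrets1 findSecrets1 findSecrets1_alt
  rw [PySem.List.foldl_append_singleton_eq_map, PySem.List.foldl_append_singleton_eq_map]
  simp only [List.nil_append]
  exact List.map_congr_left (fun q hq => pvQuery_eq arr q.1 q.2 (hpre q hq))
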